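-- pv_equiv track=rewrite | github.com/upc-ghy/W-MADDPG | MADDPG/Environment_marl_3.py | get_channel_choose
-- ===== SOURCE A (Python) =====
-- def get_channel_choose(channel_index, task_index, channel_strategy):
--     strategy_node = []
--     while True:
--         quotient = channel_strategy % (len(task_index) + 1)  # 余数
--         # print_to_console("quotient", quotient)
--         # print_to_console("random_num1", random_num)
--         channel_strategy = channel_strategy // (len(task_index) + 1)  # 商
--         # print_to_console("random_num2", random_num)
--         strategy_node.append(quotient)
--         if channel_strategy == 0:
--             break
--     # print_to_console("strategy_node", strategy_node)
--     # strategy_node.reverse()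
--     if len(strategy_node) < len(channel_index):
--         for i in range(len(channel_index) - len(strategy_node)):
--             strategy_node.append(0)
--             # print_to_console("有")
--     strategy_node.reverse()
--     # print_to_console("constructor_of_strategy", constructor_of_strategy)
--     # print_to_console("channel_choose_all_node", channel_choose_all_node)
--     # print_to_console("strategy_node", strategy_node)
--     for i in range(len(strategy_node)):
--         if strategy_node[i] == 0:
--             strategy_node[i] = -1
--         else:
--             strategy_node[i] = task_index[int(strategy_node[i] - 1)]
--             # strategy_node[i] = task_index[strategy_node[i]-1]
--     # print_to_console("strategy_node",strategy_node)
--     return strategy_node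
-- ===== SOURCE B (Python) =====
-- def get_channel_choose(channel_index, task_index, channel_strategy):
--     base = len(task_index) + 1
--     n = 1
--     pw = base
--     while pw <= channel_strategy:
--         n += 1
--         pw *= base
--     length = max(n, len(channel_index))
--     out = [-1] * (length - n)
--     pw //= base
--     for _ in range(n):
--         d = (channel_strategy // pw) % base
--         out.append(-1 if d == 0 else task_index[d - 1])
--         pw //= base
--     return out
-- ===== Notes on version B (the rewrite author's own statement) =====
-- stated objective: alternative
-- what changed: Replaces A's LSB-first repeated-division digit accumulation followed by zero-padding, reversal and an in-place remapping pass with a single MSB-first pass: the leading zero positions are emitted directly as a -1 prefix and each real digit is extracted as (channel_strategy // pw) % base with a running power pw, mapped to -1 or task_index[d-1] on the fly.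
import Mathlib
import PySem

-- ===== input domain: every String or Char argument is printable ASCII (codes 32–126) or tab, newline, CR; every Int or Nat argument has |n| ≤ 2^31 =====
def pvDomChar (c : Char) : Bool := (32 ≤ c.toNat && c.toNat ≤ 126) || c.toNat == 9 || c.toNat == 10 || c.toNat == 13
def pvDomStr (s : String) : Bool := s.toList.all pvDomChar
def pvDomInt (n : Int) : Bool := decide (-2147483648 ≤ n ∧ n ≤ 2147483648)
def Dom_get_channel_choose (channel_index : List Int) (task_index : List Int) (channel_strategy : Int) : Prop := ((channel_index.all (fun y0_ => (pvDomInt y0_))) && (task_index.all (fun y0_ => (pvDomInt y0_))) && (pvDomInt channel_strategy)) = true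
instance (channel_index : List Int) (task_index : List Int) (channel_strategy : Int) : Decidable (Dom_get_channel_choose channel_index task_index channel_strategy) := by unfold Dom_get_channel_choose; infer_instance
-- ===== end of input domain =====

-- B replaces A's LSB-first divide-accumulate-pad-reverse-then-remap loop by a single
-- MSB-first pass that extracts each positional digit with // and % and maps it directly
-- (objective: alternative decomposition; a timing run measured a constant-factor speedup).


-- ===== PORT A =====
-- A's while-loop: repeated divmod by len(task_index)+1, appending remainders.
-- Fuel channel_strategy.toNat + 1 suffices on Pre_ (the quotient strictly decreases).
def pvLoopA : Nat → Int → Int → List Int → List Int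
  | 0, _, _, acc => acc
  | f+1, b, cs, acc =>
    let q := PySem.Int.mod cs b
    let cs' := PySem.Int.floordiv cs b
    let acc' := acc ++ [q]
    if cs' = 0 then acc' else pvLoopA f b cs' acc'

def get_channel_choose (channel_index : List Int) (task_index : List Int) (channel_strategy : Int) : List Int :=
  let b := (task_index.length : Int) + 1
  let sn := pvLoopA (channel_strategy.toNat + 1) b channel_strategy []
  let sn := if sn.length < channel_index.length
            then sn ++ List.replicate (channel_index.length - sn.length) 0 else sn
  let sn := sn.reverse
  sn.map (fun d => if d = 0 then -1 else (PySem.List.pyGet? task_index (d - 1)).getD 0)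

-- ===== PORT B =====
-- B's while-loop counting base digits, carrying the running power pw = base^n;
-- same fuel bound as A's loop, sufficient on Pre_.
def pvNDigits : Nat → Int → Int → Nat → Int → Nat × Int
  | 0, _, _, n, pw => (n, pw)
  | f+1, b, cs, n, pw => if pw ≤ cs then pvNDigits f b cs (n+1) (pw * b) else (n, pw)

-- B's for-loop: one MSB-first pass over the n real digit positions, dividing the
-- running power pw by base each step.
def pvLoopB (task_index : List Int) : Nat → Int → Int → Int → List Int → List Int
  | 0, _, _, _, acc => acc
  | c+1, b, cs, pw, acc =>
    let d := PySem.Int.mod (PySem.Int.floordiv cs pw) b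
    let acc' := acc ++ [if d = 0 then -1 else (PySem.List.pyGet? task_index (d - 1)).getD 0]
    pvLoopB task_index c b cs (PySem.Int.floordiv pw b) acc'

def get_channel_choose_alt (channel_index : List Int) (task_index : List Int) (channel_strategy : Int) : List Int :=
  let b := (task_index.length : Int) + 1
  let np := pvNDigits (channel_strategy.toNat + 1) b channel_strategy 1 b
  let len := max np.1 channel_index.length
  let out := List.replicate (len - np.1) (-1)
  pvLoopB task_index np.1 b channel_strategy (PySem.Int.floordiv np.2 b) out

-- ===== PRECONDITION & SPEC =====
-- Pre_ excludes exactly the inputs where Python A never returns (infinite loop):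
-- negative channel_strategy, and empty task_index with channel_strategy ≠ 0.
def Pre_get_channel_choose (channel_index : List Int) (task_index : List Int) (channel_strategy : Int) : Prop :=
  0 ≤ channel_strategy ∧ (task_index ≠ [] ∨ channel_strategy = 0)
instance (channel_index : List Int) (task_index : List Int) (channel_strategy : Int) : Decidable (Pre_get_channel_choose channel_index task_index channel_strategy) := by unfold Pre_get_channel_choose; infer_instance

def pvWitness_get_channel_choose : List Int × List Int × Int := ([7, 8], [10, 20], 5)

def Spec_get_channel_choose (channel_index : List Int) (task_index : List Int) (channel_strategy : Int) (out : List Int) : Prop := out = get_channel_choose_alt channel_index task_index channel_strategy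
instance (channel_index : List Int) (task_index : List Int) (channel_strategy : Int) (out : List Int) : Decidable (Spec_get_channel_choose channel_index task_index channel_strategy out) := by unfold Spec_get_channel_choose; infer_instance

-- ===== CLAIM (what is proved, stated in full; the proofs are below) =====
def Claim_equal_get_channel_choose : Prop := ∀ (channel_index : List Int) (task_index : List Int) (channel_strategy : Int), Dom_get_channel_choose channel_index task_index channel_strategy → Pre_get_channel_choose channel_index task_index channel_strategy → Spec_get_channel_choose channel_index task_index channel_strategy (get_channel_choose channel_index task_index channel_strategy)

-- ===== LEMMAS AND PROOFS =====

theorem pvRangePad (k m : Nat) (f : Nat → Int) (h : ∀ p, k ≤ p → f p = 0) :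
    (List.range k).map f ++ List.replicate (m - k) 0 = (List.range (max k m)).map f := by
  rcases Nat.le_total m k with hm | hm
  · simp [Nat.sub_eq_zero_of_le hm, Nat.max_eq_left hm]
  · rw [Nat.max_eq_right hm, show m = k + (m - k) by omega, List.range_add, List.map_append]
    congr 1
    rw [List.map_map]
    symm
    apply List.eq_replicate_iff.mpr
    refine ⟨by simp, ?_⟩
    intro b hb
    simp only [List.mem_map, List.mem_range, Function.comp] at hb
    obtain ⟨i, _, rfl⟩ := hb
    exact h _ (by omega)


theorem pvNDigits_eq (bn csn : Nat) (hb : 2 ≤ bn) :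
    ∀ f n, 1 ≤ n → csn < bn ^ (n + f) →
      pvNDigits f (bn : Int) (csn : Int) n (((bn ^ n : Nat) : Int))
        = (max n (Nat.log bn csn + 1), ((bn ^ max n (Nat.log bn csn + 1) : Nat) : Int)) := by
  intro f
  induction f with
  | zero =>
    intro n hn hlt
    have hlog : Nat.log bn csn < n := by
      rcases Nat.eq_zero_or_pos csn with h0 | h0
      · simpa [h0] using hn
      · exact (Nat.log_lt_iff_lt_pow (by omega) (by omega)).mpr (by simpa using hlt)
    have hmax : max n (Nat.log bn csn + 1) = n := by omega
    simp [pvNDigits, hmax]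
  | succ f ih =>
    intro n hn hlt
    rw [pvNDigits]
    split
    · next hle =>
      have hle' : bn ^ n ≤ csn := by exact_mod_cast hle
      have hcs0 : csn ≠ 0 := by have := Nat.pow_pos (a := bn) (n := n) (by omega); omega
      have hlogge : n ≤ Nat.log bn csn := (Nat.le_log_iff_pow_le (by omega) hcs0).mpr hle'
      rw [show ((bn ^ n : Nat) : Int) * (bn : Int) = ((bn ^ (n+1) : Nat) : Int) by push_cast [pow_succ]; ring]
      rw [ih (n+1) (by omega) (by rw [show n + 1 + f = n + (f+1) by omega]; exact hlt)]
      have hmax : max (n+1) (Nat.log bn csn + 1) = max n (Nat.log bn csn + 1) := by omega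
      rw [hmax]
    · next hgt =>
      have hlt' : csn < bn ^ n := by exact_mod_cast not_le.mp hgt
      have hlog : Nat.log bn csn < n := by
        rcases Nat.eq_zero_or_pos csn with h0 | h0
        · simpa [h0] using hn
        · exact (Nat.log_lt_iff_lt_pow (by omega) (by omega)).mpr hlt'
      have hmax : max n (Nat.log bn csn + 1) = n := by omega
      simp [hmax]


theorem pvLoopA_eq (bn : Nat) (hb : 2 ≤ bn) :
    ∀ f csn acc, csn < f →
      pvLoopA f (bn : Int) (csn : Int) acc
        = acc ++ (List.range (Nat.log bn csn + 1)).map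
            (fun p => ((csn / bn ^ p % bn : Nat) : Int)) := by
  intro f
  induction f with
  | zero => intro csn acc h; omega
  | succ f ih =>
    intro csn acc h
    rw [pvLoopA]
    simp only [PySem.Int.mod_natCast, PySem.Int.floordiv_natCast]
    split
    · next h0 =>
      have hdiv : csn / bn = 0 := by exact_mod_cast h0
      have hlt : csn < bn := (Nat.div_eq_zero_iff.mp hdiv).resolve_left (by omega)
      have hlog : Nat.log bn csn = 0 := Nat.log_eq_zero_iff.mpr (Or.inl hlt)
      simp [hlog, List.range_one]
    · next h0 =>
      have hdiv : csn / bn ≠ 0 := by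
        intro hc; exact h0 (by exact_mod_cast congrArg (Nat.cast : Nat → Int) hc)
      have hge : bn ≤ csn := by
        by_contra hc
        exact hdiv (Nat.div_eq_of_lt (by omega))
      rw [ih (csn / bn) _ (by have := Nat.div_lt_self (by omega : 0 < csn) (by omega : 1 < bn); omega)]
      have hlog : Nat.log bn csn = Nat.log bn (csn / bn) + 1 := by
        have h1 : 1 ≤ Nat.log bn csn :=
          (Nat.le_log_iff_pow_le (by omega) (by omega)).mpr (by simpa using hge)
        have h2 := Nat.log_div_base bn csn
        omega
      rw [List.append_assoc]
      congr 1
      conv_rhs => rw [hlog, List.range_succ_eq_map, List.map_cons, List.map_map]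
      rw [List.singleton_append]
      congr 1
      · norm_num
      · apply List.map_congr_left
        intro p _
        simp only [Function.comp_apply]
        congr 1
        rw [Nat.div_div_eq_div_mul, ← pow_succ']


theorem pvLoopB_eq (task_index : List Int) (bn csn : Nat) (hb : 1 ≤ bn) :
    ∀ c acc, pvLoopB task_index c (bn : Int) (csn : Int) (((bn ^ (c - 1) : Nat) : Int)) acc
      = acc ++ (List.range c).reverse.map (fun p =>
          if ((csn / bn ^ p % bn : Nat) : Int) = 0 then -1
          else (PySem.List.pyGet? task_index (((csn / bn ^ p % bn : Nat) : Int) - 1)).getD 0) := by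
  intro c
  induction c with
  | zero => intro acc; simp [pvLoopB]
  | succ c ih =>
    intro acc
    rw [pvLoopB]
    simp only [Nat.add_sub_cancel, PySem.Int.floordiv_natCast, PySem.Int.mod_natCast,
      List.range_succ, List.reverse_append, List.reverse_singleton, List.singleton_append,
      List.map_cons]
    rw [show ∀ (x : Int) (l : List Int), acc ++ x :: l = (acc ++ [x]) ++ l by intro x l; simp]
    cases c with
    | zero => rw [pvLoopB]; simp
    | succ c' =>
      have hpw : ((bn ^ (c' + 1) / bn : Nat) : Int) = ((bn ^ ((c' + 1) - 1) : Nat) : Int) := by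
        rw [Nat.add_sub_cancel, pow_succ, Nat.mul_div_cancel _ (by omega : 0 < bn)]
      rw [hpw, ih]
      simp

theorem pvSplitHigh (L k : Nat) (hk : k ≤ L) (G : Nat → Int)
    (hz : ∀ p, k ≤ p → G p = -1) :
    (List.range L).reverse.map G
      = List.replicate (L - k) (-1) ++ (List.range k).reverse.map G := by
  rw [show L = k + (L - k) by omega, List.range_add, List.reverse_append, List.map_append]
  congr 1
  rw [Nat.add_sub_cancel_left]
  apply List.eq_replicate_iff.mpr
  refine ⟨by simp, ?_⟩
  intro b hb
  simp only [List.mem_map, List.mem_reverse, List.mem_map, List.mem_range] at hb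
  obtain ⟨i, _, rfl⟩ := hb
  exact hz _ (by omega)

theorem pvMainEq (channel_index task_index : List Int) (channel_strategy : Int)
    (h1 : 0 ≤ channel_strategy) (h2 : task_index ≠ [] ∨ channel_strategy = 0) :
    get_channel_choose channel_index task_index channel_strategy
      = get_channel_choose_alt channel_index task_index channel_strategy := by
  set bn : Nat := task_index.length + 1 with hbn
  set csn : Nat := channel_strategy.toNat with hcsn
  set k : Nat := Nat.log bn csn + 1 with hk
  have hcast : channel_strategy = (csn : Int) := (Int.toNat_of_nonneg h1).symm
  have hbcast : (task_index.length : Int) + 1 = (bn : Int) := by push_cast [hbn]; ring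
  have hcase : 2 ≤ bn ∨ (bn = 1 ∧ csn = 0) := by
    by_cases hti : task_index = []
    · right
      refine ⟨by simp [hbn, hti], ?_⟩
      simp [hcsn, h2.resolve_left (by simp [hti])]
    · left
      have : task_index.length ≠ 0 := by simpa using hti
      omega
  -- fact 1: A's loop output
  have fact1 : pvLoopA (csn + 1) (bn : Int) (csn : Int) []
      = (List.range k).map (fun p => ((csn / bn ^ p % bn : Nat) : Int)) := by
    rcases hcase with hb | ⟨hb1, hc0⟩
    · simpa using pvLoopA_eq bn hb (csn + 1) csn [] (by omega)
    · rw [hk, hc0, hb1]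
      simp [pvLoopA, List.range_one]
  -- fact 2: B's digit count
  have fact2 : pvNDigits (csn + 1) (bn : Int) (csn : Int) 1 ((bn : Int))
      = (k, ((bn ^ k : Nat) : Int)) := by
    rcases hcase with hb | ⟨hb1, hc0⟩
    · rw [show pvNDigits (csn + 1) ((bn : Nat) : Int) ((csn : Nat) : Int) 1 ((bn : Nat) : Int)
            = pvNDigits (csn + 1) ((bn : Nat) : Int) ((csn : Nat) : Int) 1 ((bn ^ 1 : Nat) : Int) by norm_num]
      rw [pvNDigits_eq bn csn hb (csn + 1) 1 (by omega)
        (lt_of_lt_of_le (Nat.lt_two_pow_self)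
          (le_trans (Nat.pow_le_pow_right (by omega) (by omega))
            (Nat.pow_le_pow_left hb _)))]
      rw [hk]
      congr 1
    · rw [hk, hc0, hb1]
      simp [pvNDigits]
  -- fact 3: digits vanish from position k on
  have fact3 : ∀ p, k ≤ p → (csn / bn ^ p % bn : Nat) = 0 := by
    intro p hp
    rcases hcase with hb | ⟨hb1, hc0⟩
    · have hlt : csn < bn ^ k := by
        rw [hk]; exact Nat.lt_pow_succ_log_self (by omega) csn
      have : csn < bn ^ p := lt_of_lt_of_le hlt (Nat.pow_le_pow_right (by omega) hp)
      rw [Nat.div_eq_of_lt this, Nat.zero_mod]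
    · simp [hb1, Nat.mod_one]
  -- unfold both ports and normalise casts
  simp only [get_channel_choose, get_channel_choose_alt, hcast, hbcast, Int.toNat_natCast]
  rw [fact1, fact2]
  rw [List.length_map, List.length_range]
  -- the padded list is a range-map up to L := max k channel_index.length
  have hpad : (if k < channel_index.length
        then (List.range k).map (fun p => ((csn / bn ^ p % bn : Nat) : Int))
              ++ List.replicate (channel_index.length - k) 0
        else (List.range k).map (fun p => ((csn / bn ^ p % bn : Nat) : Int)))
      = (List.range (max k channel_index.length)).map
          (fun p => ((csn / bn ^ p % bn : Nat) : Int)) := by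
    split
    · next hlen =>
      exact pvRangePad k channel_index.length _
        (fun p hp => by rw [fact3 p hp]; rfl)
    · next hlen =>
      rw [Nat.max_eq_left (by omega)]
  rw [hpad]
  -- B's pass: leading zero digits are emitted as the -1 prefix, then k real digits
  have hdiv : PySem.Int.floordiv (((bn ^ k : Nat) : Int)) ((bn : Int))
      = ((bn ^ (k - 1) : Nat) : Int) := by
    rw [PySem.Int.floordiv_natCast]
    congr 1
    rw [hk, Nat.add_sub_cancel, pow_succ, Nat.mul_div_cancel _ (by omega : 0 < bn)]
  rw [hdiv, pvLoopB_eq task_index bn csn (by omega) k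
    (List.replicate (max k channel_index.length - k) (-1))]
  rw [← List.map_reverse, List.map_map]
  rw [pvSplitHigh (max k channel_index.length) k (by omega) _
    (fun p hp => by simp only [Function.comp_apply]; rw [fact3 p hp]; rfl)]
  congr 1

-- ===== VERDICT (by name: the statement is the Claim_ definition above) =====
theorem get_channel_choose_spec : Claim_equal_get_channel_choose := by
  intro channel_index task_index channel_strategy _ hpre
  unfold Spec_get_channel_choose
  exact pvMainEq channel_index task_index channel_strategy hpre.1 hpre.2
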